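-- pv_equiv track=rewrite | github.com/gabrieltren/urionline | 1056.py | rec
-- ===== SOURCE A (Python) =====
-- def rec(b1, b2 ,maior, menor, i):
--     if maior == menor:
--         if i < maior-1:
--             if b1[i] == b2[i]:
--                 return rec(b1, b2 ,maior, menor, (i+1)) + '0'
--             else:
--                 return rec(b1, b2 ,maior, menor, (i+1)) + '1'
--         else:
--             if b1[i] == b2[i]:
--                 return '0'
--             else:
--                 return '1'
--     else:
--         if i < menor:
--             if b1[i] == b2[i]:
--                 return rec(b1, b2 ,maior, menor, (i+1)) + '0'
--             else:
--                 return rec(b1, b2 ,maior, menor, (i+1)) + '1'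
--         else:
--             if i < maior -1:
--                 return rec(b1, b2 ,maior, menor, (i+1)) + b1[i]
--             else:
--                 return b1[i]
-- ===== SOURCE B (Python) =====
-- def rec(b1, b2, maior, menor, i):
--     # Iterative rewrite: walk j from the highest touched index down to i,
--     # appending one character per index (compare-bit below cmp_end, raw b1 bit above).
--     if maior == menor:
--         last = max(i, maior - 1)
--         cmp_end = last + 1          # every position is a compare position
--     else:
--         last = max(i, menor, maior - 1)
--         cmp_end = menor
--     out = []
--     for j in range(last, i - 1, -1):
--         if j < cmp_end:
--             out.append('0' if b1[j] == b2[j] else '1')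
--         else:
--             out.append(b1[j])
--     return ''.join(out)
-- ===== Notes on version B (the rewrite author's own statement) =====
-- stated objective: idiomatic
-- what changed: Replaced the four-way branching recursion (which builds the string back-to-front via repeated concatenation) by a single iterative countdown loop over the touched index range with a precomputed upper bound and compare/copy threshold, joined once at the end.
import Mathlib
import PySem

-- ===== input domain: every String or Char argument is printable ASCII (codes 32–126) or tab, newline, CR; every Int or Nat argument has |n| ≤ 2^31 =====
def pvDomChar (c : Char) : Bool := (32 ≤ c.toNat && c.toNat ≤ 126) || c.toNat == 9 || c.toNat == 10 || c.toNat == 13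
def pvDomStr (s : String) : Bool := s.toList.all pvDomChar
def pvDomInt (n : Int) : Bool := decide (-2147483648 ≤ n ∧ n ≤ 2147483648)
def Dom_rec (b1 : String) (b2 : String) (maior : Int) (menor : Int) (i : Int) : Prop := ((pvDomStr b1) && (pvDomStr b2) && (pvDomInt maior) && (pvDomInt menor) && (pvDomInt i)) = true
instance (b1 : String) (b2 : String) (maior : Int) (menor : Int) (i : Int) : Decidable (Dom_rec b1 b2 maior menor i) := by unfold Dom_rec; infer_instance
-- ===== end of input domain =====

-- B replaces A's recursion by a single iterative countdown loop over the touched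
-- indices, appending one character per index (objective: idiomatic decomposition,
-- same cost).

-- ===== PORT A =====
-- termination helper for the port's well-founded recursion (cited in decreasing_by)
theorem pvDec {M c i : Int} (h1 : i < c) (h2 : c ≤ M) :
    (M - (i + 1)).toNat < (M - i).toNat := by omega

-- Literal port of A's recursion; PySem.Str.pyGet? = Python's s[i]
-- (none = IndexError, on which the port returns "" and Pre_rec excludes the input).
def rec (b1 : String) (b2 : String) (maior : Int) (menor : Int) (i : Int) : String :=
  if maior = menor then
    if i < maior - 1 then
      match PySem.Str.pyGet? b1 i, PySem.Str.pyGet? b2 i with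
      | some c1, some c2 =>
          rec b1 b2 maior menor (i + 1) ++ (if c1 = c2 then "0" else "1")
      | _, _ => ""
    else
      match PySem.Str.pyGet? b1 i, PySem.Str.pyGet? b2 i with
      | some c1, some c2 => if c1 = c2 then "0" else "1"
      | _, _ => ""
  else
    if i < menor then
      match PySem.Str.pyGet? b1 i, PySem.Str.pyGet? b2 i with
      | some c1, some c2 =>
          rec b1 b2 maior menor (i + 1) ++ (if c1 = c2 then "0" else "1")
      | _, _ => ""
    else
      if i < maior - 1 then
        match PySem.Str.pyGet? b1 i with
        | some c => rec b1 b2 maior menor (i + 1) ++ String.ofList [c]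
        | none => ""
      else
        match PySem.Str.pyGet? b1 i with
        | some c => String.ofList [c]
        | none => ""
termination_by (max menor (maior - 1) - i).toNat
decreasing_by
· exact pvDec ‹i < maior - 1› (le_max_right _ _)
· exact pvDec ‹i < menor› (le_max_left _ _)
· exact pvDec ‹i < maior - 1› (le_max_right _ _)

-- ===== PORT B =====
-- One character of Source B's loop body: compare-bit below cmpEnd, raw b1 bit above.
def recAltChr (l1 l2 : List Char) (cmpEnd j : Int) : Option Char :=
  if j < cmpEnd then
    (PySem.List.pyGet? l1 j).bind fun a =>
      (PySem.List.pyGet? l2 j).map fun b => if a = b then '0' else '1'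
  else
    PySem.List.pyGet? l1 j

-- Source B's loop: range(last, i-1, -1), join; a none (IndexError) yields "".
def rec_alt (b1 : String) (b2 : String) (maior : Int) (menor : Int) (i : Int) : String :=
  let last := if maior = menor then max i (maior - 1) else max i (max menor (maior - 1))
  let cmpEnd := if maior = menor then last + 1 else menor
  ((PySem.List.pyRange last (i - 1) (-1)).mapM
    (recAltChr b1.toList b2.toList cmpEnd)).elim "" String.ofList

-- ===== PRECONDITION & SPEC =====
-- Pre_rec: every index the Python programs touch is a valid Python index of its
-- string — exactly the inputs on which A returns (otherwise both raise IndexError).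
def Pre_rec (b1 : String) (b2 : String) (maior : Int) (menor : Int) (i : Int) : Prop :=
  let last := if maior = menor then max i (maior - 1) else max i (max menor (maior - 1))
  let cmpEnd := if maior = menor then last + 1 else menor
  (-(b1.toList.length : Int) ≤ i ∧ last < (b1.toList.length : Int)) ∧
    (min last (cmpEnd - 1) < i ∨
      (-(b2.toList.length : Int) ≤ i ∧ min last (cmpEnd - 1) < (b2.toList.length : Int)))
instance (b1 : String) (b2 : String) (maior : Int) (menor : Int) (i : Int) : Decidable (Pre_rec b1 b2 maior menor i) := by unfold Pre_rec; infer_instance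

def pvWitness_rec : String × String × Int × Int × Int := ("10", "11", 2, 2, 0)

def Spec_rec (b1 : String) (b2 : String) (maior : Int) (menor : Int) (i : Int) (out : String) : Prop := out = rec_alt b1 b2 maior menor i
instance (b1 : String) (b2 : String) (maior : Int) (menor : Int) (i : Int) (out : String) : Decidable (Spec_rec b1 b2 maior menor i out) := by unfold Spec_rec; infer_instance

-- ===== CLAIM (what is proved, stated in full; the proofs are below) =====
def Claim_equal_rec : Prop := ∀ (b1 : String) (b2 : String) (maior : Int) (menor : Int) (i : Int), Dom_rec b1 b2 maior menor i → Pre_rec b1 b2 maior menor i → Spec_rec b1 b2 maior menor i (rec b1 b2 maior menor i)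

-- ===== LEMMAS AND PROOFS =====

theorem pvInR (len : Nat) (j : Int) (h1 : -(len : Int) ≤ j) (h2 : j < (len : Int)) :
    PySem.Raise.InRange len j := by
  unfold PySem.Raise.InRange; omega

theorem pvGetSome {α : Type} (xs : List α) (j : Int) (h : PySem.Raise.InRange xs.length j) :
    ∃ c, PySem.List.pyGet? xs j = some c := by
  rcases hx : PySem.List.pyGet? xs j with _ | c
  · exact absurd h ((PySem.List.pyGet?_eq_none_iff xs j).mp hx)
  · exact ⟨c, rfl⟩

theorem pvRange_neg_split (a i : Int) (h : i ≤ a) :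
    PySem.List.pyRange a (i - 1) (-1) = PySem.List.pyRange a i (-1) ++ [i] := by
  rw [PySem.List.pyRange_neg_one_eq_reverse, PySem.List.pyRange_neg_one_eq_reverse,
      show i - 1 + 1 = i by ring, PySem.List.pyRange_one_cons (by omega)]
  simp

theorem pvMapM_snoc (xs : List Int) (f : Int → Option Char) (x : Int) (cs : List Char) (c : Char)
    (h1 : xs.mapM f = some cs) (h2 : f x = some c) :
    (xs ++ [x]).mapM f = some (cs ++ [c]) := by
  simp [List.mapM_append, h1, h2]

theorem pvOfList_append (cs : List Char) (c : Char) :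
    String.ofList (cs ++ [c]) = String.ofList cs ++ String.ofList [c] := by simp

theorem pvBit (c1 c2 : Char) :
    (if c1 = c2 then "0" else "1") = String.ofList [if c1 = c2 then '0' else '1'] := by
  split <;> rfl

-- A's recursion, maior = menor: chars for indices last..i, all compare positions.
theorem rec_eq_eq (b1 b2 : String) (maior menor : Int) (hm : maior = menor) :
    ∀ (n : Nat) (i : Int), (maior - 1 - i).toNat = n → i ≤ maior - 1 →
    (∀ j : Int, i ≤ j → j ≤ maior - 1 →
      PySem.Raise.InRange b1.toList.length j ∧ PySem.Raise.InRange b2.toList.length j) →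
    ∃ cs, (PySem.List.pyRange (maior - 1) (i - 1) (-1)).mapM
            (recAltChr b1.toList b2.toList maior) = some cs
      ∧ rec b1 b2 maior menor i = String.ofList cs := by
  subst hm
  intro n
  induction n with
  | zero =>
    intro i hn hle H
    have hi : i = maior - 1 := by omega
    subst hi
    obtain ⟨h1, h2⟩ := H (maior - 1) le_rfl hle
    obtain ⟨c1, hc1⟩ := pvGetSome _ _ h1
    obtain ⟨c2, hc2⟩ := pvGetSome _ _ h2
    refine ⟨[if c1 = c2 then '0' else '1'], ?_, ?_⟩
    · rw [PySem.List.pyRange_neg_one_cons (by omega),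
        PySem.List.pyRange_neg_one_eq_nil (by omega)]
      simp [List.mapM_cons, recAltChr, hc1, hc2, show maior - 1 < maior by omega]
    · rw [rec]
      rw [if_pos rfl, if_neg (show ¬ (maior - 1 < maior - 1) by omega)]
      simp only [PySem.Str.pyGet?, PySem.Chars.pyGet?]
      rw [hc1, hc2]
      exact pvBit c1 c2
  | succ n ih =>
    intro i hn hle H
    have hlt : i < maior - 1 := by omega
    obtain ⟨h1, h2⟩ := H i le_rfl hle
    obtain ⟨c1, hc1⟩ := pvGetSome _ _ h1
    obtain ⟨c2, hc2⟩ := pvGetSome _ _ h2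
    obtain ⟨cs, hcs, hrec⟩ := ih (i + 1) (by omega) (by omega)
      (fun j hj1 hj2 => H j (by omega) hj2)
    rw [show i + 1 - 1 = i by ring] at hcs
    refine ⟨cs ++ [if c1 = c2 then '0' else '1'], ?_, ?_⟩
    · rw [pvRange_neg_split _ _ (by omega)]
      exact pvMapM_snoc _ _ _ _ _ hcs (by simp [recAltChr, hc1, hc2, show i < maior by omega])
    · rw [rec]
      rw [if_pos rfl, if_pos hlt]
      simp only [PySem.Str.pyGet?, PySem.Chars.pyGet?]
      rw [hc1, hc2, hrec, pvOfList_append]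
      exact congrArg (String.ofList cs ++ ·) (pvBit c1 c2)
-- A's recursion, maior ≠ menor: compare below menor, raw b1 char from menor up.
theorem rec_eq_ne (b1 b2 : String) (maior menor : Int) (hm : maior ≠ menor) :
    ∀ (n : Nat) (i : Int), (max menor (maior - 1) - i).toNat = n →
    i ≤ max menor (maior - 1) →
    (∀ j : Int, i ≤ j → j ≤ max menor (maior - 1) →
      PySem.Raise.InRange b1.toList.length j ∧
        (j < menor → PySem.Raise.InRange b2.toList.length j)) →
    ∃ cs, (PySem.List.pyRange (max menor (maior - 1)) (i - 1) (-1)).mapM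
            (recAltChr b1.toList b2.toList menor) = some cs
      ∧ rec b1 b2 maior menor i = String.ofList cs := by
  intro n
  induction n with
  | zero =>
    intro i hn hle H
    have hi : i = max menor (maior - 1) := by omega
    obtain ⟨h1, _⟩ := H i le_rfl hle
    obtain ⟨c, hc⟩ := pvGetSome _ _ h1
    refine ⟨[c], ?_, ?_⟩
    · rw [PySem.List.pyRange_neg_one_cons (by omega),
        PySem.List.pyRange_neg_one_eq_nil (by omega), ← hi]
      simp [List.mapM_cons, recAltChr, hc, show ¬ (i < menor) by omega]
    · rw [rec]
      rw [if_neg hm, if_neg (show ¬ (i < menor) by omega),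
        if_neg (show ¬ (i < maior - 1) by omega)]
      simp only [PySem.Str.pyGet?, PySem.Chars.pyGet?]
      rw [hc]
  | succ n ih =>
    intro i hn hle H
    have hlt : i < max menor (maior - 1) := by omega
    obtain ⟨h1, h2⟩ := H i le_rfl hle
    obtain ⟨c1, hc1⟩ := pvGetSome _ _ h1
    obtain ⟨cs, hcs, hrec⟩ := ih (i + 1) (by omega) (by omega)
      (fun j hj1 hj2 => H j (by omega) hj2)
    rw [show i + 1 - 1 = i by ring] at hcs
    by_cases hmen : i < menor
    · obtain ⟨c2, hc2⟩ := pvGetSome _ _ (h2 hmen)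
      refine ⟨cs ++ [if c1 = c2 then '0' else '1'], ?_, ?_⟩
      · rw [pvRange_neg_split _ _ (by omega)]
        exact pvMapM_snoc _ _ _ _ _ hcs (by simp [recAltChr, hc1, hc2, hmen])
      · rw [rec]
        rw [if_neg hm, if_pos hmen]
        simp only [PySem.Str.pyGet?, PySem.Chars.pyGet?]
        rw [hc1, hc2, hrec, pvOfList_append]
        exact congrArg (String.ofList cs ++ ·) (pvBit c1 c2)
    · have hma : i < maior - 1 := by omega
      refine ⟨cs ++ [c1], ?_, ?_⟩
      · rw [pvRange_neg_split _ _ (by omega)]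
        exact pvMapM_snoc _ _ _ _ _ hcs (by simp [recAltChr, hc1, hmen])
      · rw [rec]
        rw [if_neg hm, if_neg hmen, if_pos hma]
        simp only [PySem.Str.pyGet?, PySem.Chars.pyGet?]
        rw [hc1, hrec, pvOfList_append]

-- ===== VERDICT (by name: the statement is the Claim_ definition above) =====
theorem rec_spec : Claim_equal_rec := by
  intro b1 b2 maior menor i _ hpre
  unfold Spec_rec rec_alt
  unfold Pre_rec at hpre
  by_cases hm : maior = menor
  · simp only [if_pos hm] at hpre ⊢
    by_cases hle : i ≤ maior - 1
    · have hmax : max i (maior - 1) = maior - 1 := by omega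
      rw [hmax] at hpre ⊢
      rw [show maior - 1 + 1 = maior from by ring] at hpre ⊢
      obtain ⟨cs, hcs, hrec⟩ := rec_eq_eq b1 b2 maior menor hm (maior - 1 - i).toNat i rfl hle
        (fun j hj1 hj2 =>
          ⟨pvInR _ _ (by omega) (by omega), pvInR _ _ (by omega) (by omega)⟩)
      rw [hcs, hrec]
      rfl
    · -- i > maior - 1: single base comparison at index i
      have hmax : max i (maior - 1) = i := by omega
      rw [hmax] at hpre ⊢
      obtain ⟨c1, hc1⟩ := pvGetSome b1.toList i (pvInR _ _ (by omega) (by omega))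
      obtain ⟨c2, hc2⟩ := pvGetSome b2.toList i (pvInR _ _ (by omega) (by omega))
      rw [PySem.List.pyRange_neg_one_cons (by omega),
        PySem.List.pyRange_neg_one_eq_nil (by omega)]
      rw [rec]
      rw [if_pos hm, if_neg (show ¬ (i < maior - 1) by omega)]
      simp only [PySem.Str.pyGet?, PySem.Chars.pyGet?]
      rw [hc1, hc2]
      simp [List.mapM_cons, recAltChr, hc1, hc2, show i < i + 1 by omega]
      exact pvBit c1 c2
  · simp only [if_neg hm] at hpre ⊢
    by_cases hle : i ≤ max menor (maior - 1)
    · have hmax : max i (max menor (maior - 1)) = max menor (maior - 1) := by omega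
      rw [hmax] at hpre ⊢
      obtain ⟨cs, hcs, hrec⟩ := rec_eq_ne b1 b2 maior menor hm
        (max menor (maior - 1) - i).toNat i rfl hle
        (fun j hj1 hj2 =>
          ⟨pvInR _ _ (by omega) (by omega),
            fun hj3 => pvInR _ _ (by omega) (by omega)⟩)
      rw [hcs, hrec]
      rfl
    · -- i above every bound: single raw character at index i
      have hmax : max i (max menor (maior - 1)) = i := by omega
      rw [hmax] at hpre ⊢
      obtain ⟨c1, hc1⟩ := pvGetSome b1.toList i (pvInR _ _ (by omega) (by omega))
      rw [PySem.List.pyRange_neg_one_cons (by omega),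
        PySem.List.pyRange_neg_one_eq_nil (by omega)]
      rw [rec]
      rw [if_neg hm, if_neg (show ¬ (i < menor) by omega),
        if_neg (show ¬ (i < maior - 1) by omega)]
      simp only [PySem.Str.pyGet?, PySem.Chars.pyGet?]
      rw [hc1]
      simp [List.mapM_cons, recAltChr, hc1, show ¬ (i < menor) by omega]
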